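-- pv_equiv track=rewrite | github.com/BradyWillma/CS3050_fs25_labs | lab_0/1_telescoping-b.py | recursive_sum_traced
-- ===== SOURCE A (Python) =====
-- def recursive_sum_traced(n, depth=0, trace_list=None):
--     """
--     Recursive sum with detailed tracing to show actual computation
--     """
--     if trace_list is None:
--         trace_list = []
--
--     indent = "  " * depth
--
--     if n <= 1:
--         trace_list.append((depth, n, f"{indent}T(1) = 1"))
--         return 1, trace_list
--
--     # Record the current call
--     trace_list.append((depth, n, f"{indent}T({n}) = T({n-1}) + {n}"))
--
--     # Recursive call
--     result_recursive, _ = recursive_sum_traced(n-1, depth+1, trace_list)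
--
--     # Compute result
--     result = result_recursive + n
--     trace_list.append((depth, n, f"{indent}T({n}) = {result_recursive} + {n} = {result}"))
--
--     return result, trace_list
-- ===== SOURCE B (Python) =====
-- def recursive_sum_traced(n, depth=0, trace_list=None):
--     """Iterative re-implementation: a descent loop writes the call entries,
--     then the base entry, then an ascent loop with a running sum writes the
--     return entries.  Appends into the same trace_list object."""
--     if trace_list is None:
--         trace_list = []
--
--     if n <= 1:
--         trace_list.append((depth, n, f"{'  ' * depth}T(1) = 1"))
--         return 1, trace_list
--
--     # descent: record each pending call, deepest last
--     for v in range(n, 1, -1):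
--         d = depth + (n - v)
--         trace_list.append((d, v, f"{'  ' * d}T({v}) = T({v - 1}) + {v}"))
--
--     # base case reached at the deepest level
--     d = depth + (n - 1)
--     trace_list.append((d, 1, f"{'  ' * d}T(1) = 1"))
--
--     # ascent: unwind with a running sum
--     prev = 1
--     for v in range(2, n + 1):
--         d = depth + (n - v)
--         before = prev
--         prev += v
--         trace_list.append((d, v, f"{'  ' * d}T({v}) = {before} + {v} = {prev}"))
--
--     return prev, trace_list
-- ===== Notes on version B (the rewrite author's own statement) =====
-- stated objective: alternative
-- what changed: Replaces the recursion with an explicit two-pass iteration: a descent loop emits the call-trace entries, then the base entry, then an ascent loop with a running sum emits the return entries; same O(n) work without recursion (so large n cannot hit CPython's recursion limit, which is why Pre_ keeps n <= 5000).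
import Mathlib
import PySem

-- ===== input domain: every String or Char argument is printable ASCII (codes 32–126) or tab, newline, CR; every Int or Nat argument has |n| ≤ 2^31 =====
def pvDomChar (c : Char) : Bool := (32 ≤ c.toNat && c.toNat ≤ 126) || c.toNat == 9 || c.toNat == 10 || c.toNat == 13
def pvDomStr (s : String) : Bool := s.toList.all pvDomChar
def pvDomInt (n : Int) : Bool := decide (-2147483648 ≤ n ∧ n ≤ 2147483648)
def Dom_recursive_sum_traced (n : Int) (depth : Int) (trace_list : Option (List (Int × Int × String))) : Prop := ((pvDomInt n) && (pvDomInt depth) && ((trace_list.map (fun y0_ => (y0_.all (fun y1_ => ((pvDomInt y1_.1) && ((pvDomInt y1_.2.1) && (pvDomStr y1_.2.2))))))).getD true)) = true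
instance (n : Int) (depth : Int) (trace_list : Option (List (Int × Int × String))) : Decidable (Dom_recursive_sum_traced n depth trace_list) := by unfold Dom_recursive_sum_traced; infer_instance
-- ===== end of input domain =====

-- B replaces the recursion by an explicit descent loop + base entry + ascent loop with a running
-- sum (alternative decomposition, no recursion). Return-value equivalence only: both Pythons
-- append into the caller's trace_list in place.

-- shared formatting helpers ("  " * d, and the two f-strings; exact on any Int arguments)
def pyIndent (d : Int) : String := String.ofList (List.replicate (2 * d).toNat ' ')

def traceCall (d v : Int) : Int × Int × String :=
  (d, v, pyIndent d ++ "T(" ++ PySem.Int.toStr v ++ ") = T(" ++ PySem.Int.toStr (v - 1) ++ ") + " ++ PySem.Int.toStr v)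

def traceBase (d v : Int) : Int × Int × String :=
  (d, v, pyIndent d ++ "T(1) = 1")

def traceRet (d v r : Int) : Int × Int × String :=
  (d, v, pyIndent d ++ "T(" ++ PySem.Int.toStr v ++ ") = " ++ PySem.Int.toStr r ++ " + " ++ PySem.Int.toStr v ++ " = " ++ PySem.Int.toStr (r + v))

-- ===== PORT A =====
-- the recursion, with trace_list already defaulted to []
def recAgo (n : Int) (depth : Int) (tl : List (Int × Int × String)) : Int × (List (Int × Int × String)) :=
  if n ≤ 1 then (1, tl ++ [traceBase depth n])
  else
    let tl1 := tl ++ [traceCall depth n]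
    let p := recAgo (n - 1) (depth + 1) tl1
    (p.1 + n, p.2 ++ [traceRet depth n p.1])
termination_by (n - 1).toNat
decreasing_by omega

def recursive_sum_traced (n : Int) (depth : Int) (trace_list : Option (List (Int × Int × String))) : Int × (List (Int × Int × String)) :=
  recAgo n depth (trace_list.getD [])

-- ===== PORT B =====
def recursive_sum_traced_alt (n : Int) (depth : Int) (trace_list : Option (List (Int × Int × String))) : Int × (List (Int × Int × String)) :=
  let tl := trace_list.getD []
  if n ≤ 1 then (1, tl ++ [traceBase depth n])
  else
    -- descent loop: for v in range(n, 1, -1)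
    let tl := (PySem.List.pyRange n 1 (-1)).foldl
      (fun acc v => acc ++ [traceCall (depth + (n - v)) v]) tl
    -- base entry at the deepest level
    let tl := tl ++ [traceBase (depth + (n - 1)) 1]
    -- ascent loop with running sum: for v in range(2, n+1)
    let p := (PySem.List.pyRange 2 (n + 1) 1).foldl
      (fun (st : Int × List (Int × Int × String)) v =>
        (st.1 + v, st.2 ++ [traceRet (depth + (n - v)) v st.1])) (1, tl)
    p

-- ===== PRECONDITION & SPEC =====
-- Pre_ excludes only n > 5000: there A's n-deep recursion can exhaust the interpreter's
-- recursion limit and raise RecursionError (the exact threshold depends on the configured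
-- limit, so a closed conservative bound is used); B has no recursion there.
def Pre_recursive_sum_traced (n : Int) (depth : Int) (trace_list : Option (List (Int × Int × String))) : Prop := n ≤ 5000
instance (n : Int) (depth : Int) (trace_list : Option (List (Int × Int × String))) : Decidable (Pre_recursive_sum_traced n depth trace_list) := by unfold Pre_recursive_sum_traced; infer_instance
def pvWitness_recursive_sum_traced : Int × Int × (Option (List (Int × Int × String))) := (5, 0, none)

def Spec_recursive_sum_traced (n : Int) (depth : Int) (trace_list : Option (List (Int × Int × String))) (out : Int × (List (Int × Int × String))) : Prop := out = recursive_sum_traced_alt n depth trace_list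
instance (n : Int) (depth : Int) (trace_list : Option (List (Int × Int × String))) (out : Int × (List (Int × Int × String))) : Decidable (Spec_recursive_sum_traced n depth trace_list out) := by unfold Spec_recursive_sum_traced; infer_instance

-- ===== CLAIM (what is proved, stated in full; the proofs are below) =====
def Claim_equal_recursive_sum_traced : Prop := ∀ (n : Int) (depth : Int) (trace_list : Option (List (Int × Int × String))), Dom_recursive_sum_traced n depth trace_list → Pre_recursive_sum_traced n depth trace_list → Spec_recursive_sum_traced n depth trace_list (recursive_sum_traced n depth trace_list)

-- ===== LEMMAS AND PROOFS =====

-- B's non-base branch as a standalone function (definitionally what recursive_sum_traced_alt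
-- computes when the first branch is not taken)
def altElse (n : Int) (depth : Int) (tl : List (Int × Int × String)) : Int × (List (Int × Int × String)) :=
  let tl := (PySem.List.pyRange n 1 (-1)).foldl
    (fun acc v => acc ++ [traceCall (depth + (n - v)) v]) tl
  let tl := tl ++ [traceBase (depth + (n - 1)) 1]
  (PySem.List.pyRange 2 (n + 1) 1).foldl
    (fun (st : Int × List (Int × Int × String)) v =>
      (st.1 + v, st.2 ++ [traceRet (depth + (n - v)) v st.1])) (1, tl)

-- unrolling B's loops once mirrors A's recursive step
lemma altElse_step (n depth : Int) (tl : List (Int × Int × String)) (h2 : 1 < n) :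
    altElse n depth tl =
      ((altElse (n - 1) (depth + 1) (tl ++ [traceCall depth n])).1 + n,
       (altElse (n - 1) (depth + 1) (tl ++ [traceCall depth n])).2
         ++ [traceRet depth n (altElse (n - 1) (depth + 1) (tl ++ [traceCall depth n])).1]) := by
  unfold altElse
  rw [PySem.List.pyRange_neg_one_cons h2]
  rw [show n + 1 = n - 1 + 1 + 1 by ring]
  rw [PySem.List.pyRange_one_succ_right (show (2:Int) ≤ n - 1 + 1 by omega)]
  simp only [List.foldl_cons, List.foldl_append, List.foldl_nil]
  simp only [show n - 1 + 1 = n from by ring, sub_self, add_zero]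
  rw [show depth + 1 + (n - 1 - 1) = depth + (n - 1) by ring]
  rw [PySem.List.foldl_congr_mem (PySem.List.pyRange (n - 1) 1 (-1))
       (fun acc v => acc ++ [traceCall (depth + 1 + (n - 1 - v)) v])
       (fun acc v => acc ++ [traceCall (depth + (n - v)) v])
       (tl ++ [traceCall depth n])
       (fun acc x _ => by simp only [show depth + 1 + (n - 1 - x) = depth + (n - x) from by ring])]
  rw [PySem.List.foldl_congr_mem (PySem.List.pyRange 2 n 1)
       (fun (st : Int × List (Int × Int × String)) v =>
         (st.1 + v, st.2 ++ [traceRet (depth + 1 + (n - 1 - v)) v st.1]))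
       (fun (st : Int × List (Int × Int × String)) v =>
         (st.1 + v, st.2 ++ [traceRet (depth + (n - v)) v st.1]))
       _
       (fun acc x _ => by simp only [show depth + 1 + (n - 1 - x) = depth + (n - x) from by ring])]

lemma recAgo_eq_altElse (k : Nat) : ∀ (n depth : Int) (tl : List (Int × Int × String)),
    n = (k : Int) + 1 → recAgo n depth tl = altElse n depth tl := by
  induction k with
  | zero =>
      intro n depth tl hn
      subst hn
      rw [recAgo]
      norm_num [altElse,
        PySem.List.pyRange_neg_one_eq_nil (by norm_num : (0:Int) + 1 ≤ 1),
        PySem.List.pyRange_one_eq_nil (show (0:Int) + 1 + 1 ≤ 2 by norm_num)]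
  | succ k ih =>
      intro n depth tl hn
      have h2 : (1:Int) < n := by omega
      rw [altElse_step n depth tl h2,
          ← ih (n - 1) (depth + 1) (tl ++ [traceCall depth n]) (by omega)]
      rw [recAgo, if_neg (by omega)]

-- ===== VERDICT (by name: the statement is the Claim_ definition above) =====
theorem recursive_sum_traced_spec : Claim_equal_recursive_sum_traced := by
  intro n depth trace_list _ _
  unfold Spec_recursive_sum_traced recursive_sum_traced recursive_sum_traced_alt
  by_cases h : n ≤ 1
  · rw [recAgo, if_pos h]
    simp only [if_pos h]
  · simp only [if_neg h]
    exact recAgo_eq_altElse (n - 1).toNat n depth _ (by omega)
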